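-- pv_equiv track=rewrite | github.com/chosaihim/jungle_codingTest_study | FEB/12th/태양_비밀지도.py | solution
-- ===== SOURCE A (Python) =====
-- def solution(n, arr1, arr2):
--     arr_result = [0] * n
--     def parse_to_binary(n, value) :
--         sharp = ""
--         for _ in range(n) :
--             if value & pow(2,_) :
--                 sharp = "#" + sharp
--                 value -= pow(2,_)
--             else :
--                 sharp = " " + sharp
--         return sharp
--
--     answer = []
--     for i in range(n) :
--         arr_result[i] = arr1[i] | arr2[i]
--         answer.append(parse_to_binary(n, arr_result[i]))
--
--     return answer
-- ===== SOURCE B (Python) =====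
-- def solution(n, arr1, arr2):
--     return [format((arr1[i] | arr2[i]) & ((1 << n) - 1), 'b').zfill(n)
--             .replace('1', '#').replace('0', ' ')
--             for i in range(n)]
-- ===== Notes on version B (the rewrite author's own statement) =====
-- stated objective: idiomatic
-- what changed: Replaces the hand-written per-bit extract-and-subtract loop with a comprehension that masks the OR to n bits and renders it via binary string formatting (format/zfill) plus character replacement.
import Mathlib
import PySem

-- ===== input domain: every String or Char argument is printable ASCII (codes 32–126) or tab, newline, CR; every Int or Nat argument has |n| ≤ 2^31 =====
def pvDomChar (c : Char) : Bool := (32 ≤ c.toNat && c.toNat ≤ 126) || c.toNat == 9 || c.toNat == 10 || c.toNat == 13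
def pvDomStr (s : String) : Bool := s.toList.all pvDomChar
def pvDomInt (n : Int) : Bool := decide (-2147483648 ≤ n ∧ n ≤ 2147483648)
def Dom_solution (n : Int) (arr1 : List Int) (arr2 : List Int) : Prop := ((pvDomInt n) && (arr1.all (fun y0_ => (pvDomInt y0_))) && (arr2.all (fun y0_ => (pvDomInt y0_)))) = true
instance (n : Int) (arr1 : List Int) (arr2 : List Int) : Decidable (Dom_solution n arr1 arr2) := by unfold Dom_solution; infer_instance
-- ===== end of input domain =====

-- B renders each row by formatting the masked OR as a zero-padded binary string and
-- substituting characters, instead of A's per-bit extract-and-subtract loop (objective: idiomatic).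

-- ===== PORT A =====
-- Python strings are modeled as List Char (PySem convention); "#" + sharp is '#' :: sharp.
def parseToBinary (n : Int) (value : Int) : String :=
  String.ofList ((PySem.List.pyRange 0 n 1).foldl
    (fun (st : List Char × Int) k =>
      if PySem.Int.band st.2 (2 ^ k.toNat) ≠ 0 then ('#' :: st.1, st.2 - 2 ^ k.toNat)
      else (' ' :: st.1, st.2)) ([], value)).1

-- arr_result = [0] * n; the loop assigns arr_result[i] and reads it back (pySetD/pyGetD;
-- totalised with default 0 — Pre_solution excludes the IndexError inputs).
def solution (n : Int) (arr1 : List Int) (arr2 : List Int) : List String :=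
  ((PySem.List.pyRange 0 n 1).foldl
    (fun (st : List Int × List String) i =>
      let ar := PySem.List.pySetD st.1 i
        (PySem.Int.bor (PySem.List.pyGetD arr1 i 0) (PySem.List.pyGetD arr2 i 0))
      (ar, st.2 ++ [parseToBinary n (PySem.List.pyGetD ar i 0)]))
    (List.replicate n.toNat 0, [])).2

-- ===== PORT B =====
-- format((arr1[i]|arr2[i]) & ((1<<n)-1), 'b').zfill(n).replace('1','#').replace('0',' ')
def rowAlt (n : Int) (v : Int) : String :=
  String.ofList (PySem.Chars.replace (PySem.Chars.replace
    (PySem.Chars.zfill (PySem.Int.toBinChars (PySem.Int.band v ((1 <<< n.toNat) - 1))) n)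
    ['1'] ['#']) ['0'] [' '])

def solution_alt (n : Int) (arr1 : List Int) (arr2 : List Int) : List String :=
  (PySem.List.pyRange 0 n 1).map (fun i =>
    rowAlt n (PySem.Int.bor (PySem.List.pyGetD arr1 i 0) (PySem.List.pyGetD arr2 i 0)))

-- ===== PRECONDITION & SPEC =====
-- Pre_: exactly the inputs where Python A returns normally — arr1[i]/arr2[i] must exist
-- for every i in range(n) (otherwise A raises IndexError; B raises there too).
def Pre_solution (n : Int) (arr1 : List Int) (arr2 : List Int) : Prop :=
  n ≤ PySem.List.len arr1 ∧ n ≤ PySem.List.len arr2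
instance (n : Int) (arr1 : List Int) (arr2 : List Int) : Decidable (Pre_solution n arr1 arr2) := by unfold Pre_solution; infer_instance

def pvWitness_solution : Int × List Int × List Int := (3, [9, 20, 28], [30, 1, 3])

def Spec_solution (n : Int) (arr1 : List Int) (arr2 : List Int) (out : List String) : Prop := out = solution_alt n arr1 arr2
instance (n : Int) (arr1 : List Int) (arr2 : List Int) (out : List String) : Decidable (Spec_solution n arr1 arr2 out) := by unfold Spec_solution; infer_instance

-- ===== CLAIM (what is proved, stated in full; the proofs are below) =====
def Claim_equal_solution : Prop := ∀ (n : Int) (arr1 : List Int) (arr2 : List Int), Dom_solution n arr1 arr2 → Pre_solution n arr1 arr2 → Spec_solution n arr1 arr2 (solution n arr1 arr2)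

-- ===== LEMMAS AND PROOFS =====
lemma natMod2 (x k : Nat) : x % 2 ^ (k + 1) = x % 2 ^ k + 2 ^ k * (x / 2 ^ k % 2) := by
  rw [pow_succ, Nat.mod_mul]
lemma nat_and_two_pow_eq (x k : Nat) : x &&& 2 ^ k = x % 2 ^ (k + 1) - x % 2 ^ k := by
  rw [Nat.and_two_pow, Nat.testBit_eq_decide_div_mod_eq, natMod2]
  rcases Nat.mod_two_eq_zero_or_one (x / 2 ^ k) with h | h <;> simp [h]
lemma emod_neg_one_sub (a : Nat) (M : Int) (hM : 0 < M) :
    (-1 - (a : Int)) % M = M - 1 - (a : Int) % M := by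
  have h0 : (0:Int) ≤ (a : Int) % M := Int.emod_nonneg _ (ne_of_gt hM)
  have h1 : (a : Int) % M < M := Int.emod_lt_of_pos _ hM
  have hdef : (a : Int) % M = a - M * ((a : Int) / M) := Int.emod_def _ _
  have key : (-1 - (a : Int)) = (M - 1 - (a : Int) % M) + M * (-(1 + (a : Int) / M)) := by
    rw [hdef]; ring
  rw [key, Int.add_mul_emod_self_left, Int.emod_eq_of_lt (by omega) (by omega)]

lemma cast_pow_toNat (k : Nat) : ((2:Int) ^ k).toNat = 2 ^ k := by
  have : ((2:Int) ^ k) = ((2 ^ k : Nat) : Int) := by push_cast; ring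
  rw [this, Int.toNat_natCast]

lemma cast_nat_mod (a j : Nat) : ((a : Int)) % ((2:Int) ^ j) = ((a % 2 ^ j : Nat) : Int) := by
  push_cast; rfl

lemma bandpow (v : Int) (k : Nat) :
    PySem.Int.band v (2 ^ k) = v % 2 ^ (k + 1) - v % 2 ^ k := by
  have hmle : ∀ x : Nat, x % 2 ^ k ≤ x % 2 ^ (k + 1) := by
    intro x; rw [natMod2]; omega
  have h2k : (0:Int) < 2 ^ k := by positivity
  cases v with
  | ofNat a =>
      rw [Int.ofNat_eq_natCast, PySem.Int.band_of_nonneg (by positivity) (le_of_lt h2k),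
        Int.toNat_natCast, cast_pow_toNat, nat_and_two_pow_eq, cast_nat_mod, cast_nat_mod]
      have := hmle a
      push_cast [this]; ring
  | negSucc a =>
      have hv : (Int.negSucc a) = -1 - (a : Int) := by
        simp [Int.negSucc_eq]; ring
      have hnb : ¬ (0 ≤ Int.negSucc a) := by rw [hv]; omega
      have htn : (-(Int.negSucc a) - 1).toNat = a := by rw [hv]; simp
      have hband : PySem.Int.band (Int.negSucc a) (2 ^ k) =
          ((2 ^ k - (2 ^ k &&& a) : Nat) : Int) := by
        unfold PySem.Int.band
        rw [if_neg hnb, if_pos (le_of_lt h2k), htn, cast_pow_toNat]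
      have hnat : 2 ^ k &&& a = a % 2 ^ (k + 1) - a % 2 ^ k := by
        rw [Nat.land_comm, nat_and_two_pow_eq]
      have hle := hmle a
      have hub : a % 2 ^ (k+1) - a % 2 ^ k ≤ 2 ^ k := by
        rcases Nat.mod_two_eq_zero_or_one (a / 2 ^ k) with h | h <;> rw [natMod2, h] <;> omega
      rw [hband, hv, emod_neg_one_sub a _ (by positivity), emod_neg_one_sub a _ h2k,
        cast_nat_mod, cast_nat_mod, hnat]
      push_cast [hub, hle]
      ring

lemma band_mask (v : Int) (k : Nat) :
    PySem.Int.band v (2 ^ k - 1) = v % 2 ^ k := by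
  have hmask : ∀ x : Nat, x &&& (2 ^ k - 1) = x % 2 ^ k := fun x => Nat.and_two_pow_sub_one_eq_mod x k
  have h2k : (0:Int) ≤ 2 ^ k - 1 := by
    have : (0:Int) < 2 ^ k := by positivity
    omega
  have hcast : ((2:Int) ^ k - 1).toNat = 2 ^ k - 1 := by
    have : ((2:Int) ^ k - 1) = ((2 ^ k - 1 : Nat) : Int) := by
      push_cast [Nat.one_le_two_pow]; ring
    rw [this, Int.toNat_natCast]
  cases v with
  | ofNat a =>
      rw [Int.ofNat_eq_natCast, PySem.Int.band_of_nonneg (by positivity) h2k,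
        Int.toNat_natCast, hcast, hmask, cast_nat_mod]
  | negSucc a =>
      have hv : (Int.negSucc a) = -1 - (a : Int) := by
        simp [Int.negSucc_eq]; ring
      have hnb : ¬ (0 ≤ Int.negSucc a) := by rw [hv]; omega
      have htn : (-(Int.negSucc a) - 1).toNat = a := by rw [hv]; simp
      have hband : PySem.Int.band (Int.negSucc a) (2 ^ k - 1) =
          (((2 ^ k - 1) - ((2 ^ k - 1) &&& a) : Nat) : Int) := by
        unfold PySem.Int.band
        rw [if_neg hnb, if_pos h2k, htn, hcast]
      have hnat : (2 ^ k - 1) &&& a = a % 2 ^ k := by rw [Nat.land_comm, hmask]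
      have hlt : a % 2 ^ k < 2 ^ k := Nat.mod_lt _ (by positivity)
      rw [hband, hv, emod_neg_one_sub a _ (by positivity), cast_nat_mod, hnat]
      have h1 : 1 ≤ 2 ^ k := Nat.one_le_two_pow
      push_cast [Nat.le_sub_one_of_lt hlt, h1]
      ring

lemma emod_sub_facts (v : Int) (N : Nat) :
    (v % 2 ^ (N+1) - v % 2 ^ N = 0 ∨ v % 2 ^ (N+1) - v % 2 ^ N = 2 ^ N) ∧
    PySem.Int.band (v - v % 2 ^ N) (2 ^ N) = v % 2 ^ (N+1) - v % 2 ^ N := by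
  have hpos : (0:Int) < 2 ^ N := by positivity
  have hpos1 : (0:Int) < 2 ^ (N+1) := by positivity
  set e := v % 2 ^ (N+1) with hee
  set l := v % 2 ^ N with hll
  have he0 : 0 ≤ e := Int.emod_nonneg _ (ne_of_gt hpos1)
  have he1 : e < 2 ^ (N+1) := Int.emod_lt_of_pos _ hpos1
  have hl0 : 0 ≤ l := Int.emod_nonneg _ (ne_of_gt hpos)
  have hl1 : l < 2 ^ N := Int.emod_lt_of_pos _ hpos
  have hdvd : (2:Int) ^ N ∣ 2 ^ (N+1) := ⟨2, by ring⟩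
  have hel : e % 2 ^ N = l := by rw [hee, Int.emod_emod_of_dvd _ hdvd]
  have hq : e - l = 2 ^ N * (e / 2 ^ N) := by
    have := Int.emod_def e (2 ^ N)
    omega
  have hq0 : 0 ≤ e / 2 ^ N := Int.ediv_nonneg he0 (le_of_lt hpos)
  have hq1 : e / 2 ^ N ≤ 1 := by
    by_contra hcon
    have h2 : (2:Int) ≤ e / 2 ^ N := by omega
    have : (2:Int) ^ N * 2 ≤ 2 ^ N * (e / 2 ^ N) :=
      mul_le_mul_of_nonneg_left h2 (le_of_lt hpos)
    have hps : (2:Int) ^ (N+1) = 2 ^ N * 2 := by ring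
    omega
  have hcases : e - l = 0 ∨ e - l = 2 ^ N := by
    rcases (by omega : e / 2 ^ N = 0 ∨ e / 2 ^ N = 1) with h | h <;> rw [h] at hq <;> omega
  refine ⟨hcases, ?_⟩
  rw [bandpow]
  have h1 : (v - l) % 2 ^ N = 0 := by
    rw [hll, Int.sub_emod]
    simp
  have h2 : (v - l) % 2 ^ (N+1) = e - l := by
    rw [Int.sub_emod, ← hee, Int.emod_eq_of_lt hl0 (by omega),
      Int.emod_eq_of_lt (by omega) (by omega)]
  rw [h1, h2]
  omega

lemma foldA (N : Nat) (v : Int) :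
    (PySem.List.pyRange 0 (N : Int) 1).foldl
      (fun (st : List Char × Int) k =>
        if PySem.Int.band st.2 (2 ^ k.toNat) ≠ 0 then ('#' :: st.1, st.2 - 2 ^ k.toNat)
        else (' ' :: st.1, st.2)) ([], v)
      = (((List.range N).map (fun k => if v % 2 ^ (k + 1) - v % 2 ^ k ≠ 0 then '#' else ' ')).reverse,
         v - v % 2 ^ N) := by
  induction N with
  | zero =>
      rw [show ((0:Nat):Int) = 0 by rfl, PySem.List.pyRange_one_eq_nil (le_refl 0)]
      simp
  | succ N ih =>
      have hcast : ((N + 1 : Nat) : Int) = (N : Int) + 1 := by push_cast; ring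
      rw [hcast, PySem.List.pyRange_one_succ_right (Int.natCast_nonneg N),
        List.foldl_append, ih]
      simp only [List.foldl_cons, List.foldl_nil, Int.toNat_natCast]
      obtain ⟨hcases, hband⟩ := emod_sub_facts v N
      rw [hband]
      rw [List.range_succ, List.map_append, List.reverse_append]
      by_cases hc : v % 2 ^ (N+1) - v % 2 ^ N = 0
      · rw [if_neg (by simpa using hc)]
        simp only [List.map_cons, List.map_nil, List.reverse_cons, List.reverse_nil,
          List.nil_append, List.singleton_append]
        rw [if_neg (by simpa using hc)]
        simp only [Prod.mk.injEq]
        exact ⟨trivial, by omega⟩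
      · rw [if_pos (by simpa using hc)]
        simp only [List.map_cons, List.map_nil, List.reverse_cons, List.reverse_nil,
          List.nil_append, List.singleton_append]
        rw [if_pos (by simpa using hc)]
        have : v % 2 ^ (N+1) - v % 2 ^ N = 2 ^ N := by omega
        simp only [Prod.mk.injEq]
        exact ⟨trivial, by omega⟩

def binDigits (m : Nat) : List Char :=
  if _h : m < 2 then [Nat.digitChar m] else binDigits (m / 2) ++ [Nat.digitChar (m % 2)]
  decreasing_by exact Nat.div_lt_self (by omega) (by omega)

lemma binDigits_lt (m : Nat) (h : m < 2) : binDigits m = [Nat.digitChar m] := by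
  rw [binDigits, dif_pos h]

lemma binDigits_ge (m : Nat) (h : ¬ m < 2) :
    binDigits m = binDigits (m / 2) ++ [Nat.digitChar (m % 2)] := by
  rw [binDigits, dif_neg h]

lemma mem_binDigits (M : Nat) : ∀ c ∈ binDigits M, c = '0' ∨ c = '1' := by
  induction M using Nat.strong_induction_on with
  | _ M ih =>
    by_cases h : M < 2
    · rw [binDigits_lt M h]
      interval_cases M <;> simp [Nat.digitChar]
    · rw [binDigits_ge M h]
      intro c hc
      rcases List.mem_append.1 hc with h1 | h1
      · exact ih (M / 2) (Nat.div_lt_self (by omega) (by omega)) c h1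
      · have : M % 2 = 0 ∨ M % 2 = 1 := by omega
        rcases this with h2 | h2 <;> simp [h2, Nat.digitChar] at h1 <;> simp [h1]

lemma binDigits_ne_nil (M : Nat) : binDigits M ≠ [] := by
  by_cases h : M < 2
  · rw [binDigits_lt M h]; simp
  · rw [binDigits_ge M h]; simp

lemma toDigitsCore_two_eq : ∀ (f M : Nat) (acc : List Char), M < 2 ^ f →
    Nat.toDigitsCore 2 (f + 1) M acc = binDigits M ++ acc := by
  intro f
  induction f with
  | zero =>
      intro M acc h
      have : M = 0 := by omega
      subst this
      simp [Nat.toDigitsCore, binDigits_lt 0 (by omega)]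
  | succ f ih =>
      intro M acc h
      rw [Nat.toDigitsCore]
      by_cases h2 : M / 2 = 0
      · rw [if_pos h2]
        have : M < 2 := by omega
        rw [binDigits_lt M this]
        have hM : M % 2 = M := Nat.mod_eq_of_lt this
        rw [hM]
        simp
      · rw [if_neg h2]
        rw [ih (M / 2) _ (by rw [pow_succ] at h; omega)]
        rw [binDigits_ge M (by omega)]
        simp

lemma toDigits_two_eq (M : Nat) : Nat.toDigits 2 M = binDigits M := by
  have h := toDigitsCore_two_eq M M [] Nat.lt_two_pow_self
  rw [Nat.toDigits]
  rw [h]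
  simp

lemma binDigits_length_le (N M : Nat) (h1 : 1 ≤ N) (h2 : M < 2 ^ N) :
    (binDigits M).length ≤ N := by
  rw [← toDigits_two_eq]
  exact Nat.toDigits_length 2 M N (by omega) h2

lemma zfill_eq (N : Nat) (M : Nat) (h : (binDigits M).length ≤ N) :
    PySem.Chars.zfill (binDigits M) (N : Int) =
      List.replicate (N - (binDigits M).length) '0' ++ binDigits M := by
  rw [PySem.Chars.zfill.eq_def]
  by_cases hle : (N : Int) ≤ ((binDigits M).length : Int)
  · rw [if_pos hle]
    have : N = (binDigits M).length := by exact_mod_cast le_antisymm (by exact_mod_cast hle) h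
    rw [this]
    simp
  · rw [if_neg hle]
    rcases hnil : binDigits M with _ | ⟨c, rest⟩
    · exact absurd hnil (binDigits_ne_nil M)
    · have hc : c = '0' ∨ c = '1' := mem_binDigits M c (by rw [hnil]; simp)
      have hnp : ¬ (c = '+' ∨ c = '-') := by rcases hc with h'|h' <;> simp [h']
      dsimp only
      rw [if_neg hnp]
      simp

lemma digitChar_mod2 (M : Nat) : Nat.digitChar (M % 2) = if M / 2 ^ 0 % 2 = 1 then '1' else '0' := by
  have : M % 2 = 0 ∨ M % 2 = 1 := by omega
  rcases this with h | h <;> simp [h, Nat.digitChar]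

lemma padded_eq : ∀ (N : Nat), 1 ≤ N → ∀ (M : Nat), M < 2 ^ N →
    List.replicate (N - (binDigits M).length) '0' ++ binDigits M =
      ((List.range N).map (fun k => if M / 2 ^ k % 2 = 1 then '1' else '0')).reverse := by
  intro N
  induction N with
  | zero => omega
  | succ N ih =>
    intro _ M hM
    by_cases hN : N = 0
    · subst hN
      have h2 : M < 2 := by omega
      rw [binDigits_lt M h2]
      simp [List.range_succ]
      have : M % 2 = M := Nat.mod_eq_of_lt h2
      rcases (by omega : M = 0 ∨ M = 1) with h | h <;> simp [h, Nat.digitChar]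
    · -- step: peel the low bit
      have hN1 : 1 ≤ N := by omega
      have hM2 : M / 2 < 2 ^ N := by
        rw [pow_succ] at hM; omega
      have hrhs : ((List.range (N+1)).map (fun k => if M / 2 ^ k % 2 = 1 then '1' else '0')).reverse
          = ((List.range N).map (fun k => if (M / 2) / 2 ^ k % 2 = 1 then '1' else '0')).reverse
            ++ [if M / 2 ^ 0 % 2 = 1 then '1' else '0'] := by
        rw [List.range_succ_eq_map]
        simp only [List.map_cons, List.map_map, List.reverse_cons]
        congr 1
        congr 1
        apply List.map_congr_left
        intro k _
        simp only [Function.comp_apply]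
        have : M / 2 ^ (k + 1) = M / 2 / 2 ^ k := by
          rw [Nat.div_div_eq_div_mul, pow_succ']
        rw [Nat.succ_eq_add_one, this]
      rw [hrhs, ← ih hN1 (M / 2) hM2]
      by_cases h2 : M < 2
      · rw [binDigits_lt M h2]
        have hd : M / 2 = 0 := by omega
        rw [hd, binDigits_lt 0 (by omega)]
        have hmm : M % 2 = M := Nat.mod_eq_of_lt h2
        simp only [List.length_singleton]
        rw [List.append_assoc]
        have : N + 1 - 1 = (N - 1) + 1 := by omega
        rw [this, List.replicate_succ']
        simp [Nat.digitChar]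
        rcases (by omega : M = 0 ∨ M = 1) with h | h <;> simp [h]
      · rw [binDigits_ge M h2]
        rw [← List.append_assoc]
        congr 1
        · congr 1
          simp only [List.length_append, List.length_singleton]
          congr 1
          omega
        · rw [digitChar_mod2]

lemma replace_go_single (o r : Char) :
    ∀ (fuel : Nat) (l acc : List Char), l.length ≤ fuel →
    PySem.Chars.replace.go [o] [r] fuel l acc =
      acc.reverse ++ l.map (fun c => if c = o then r else c) := by
  intro fuel
  induction fuel with
  | zero =>
      intro l acc h
      have : l = [] := by
        cases l with
        | nil => rfl
        | cons c t => simp at h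
      subst this
      simp [PySem.Chars.replace.go]
  | succ fuel ih =>
      intro l acc h
      cases l with
      | nil => simp [PySem.Chars.replace.go]
      | cons c t =>
          rw [PySem.Chars.replace.go]
          by_cases hco : c = o
          · have hpre : List.isPrefixOf [o] (c :: t) = true := by
              simp [List.isPrefixOf, hco]
            rw [if_pos hpre]
            have hdrop : List.drop [o].length (c :: t) = t := by simp
            rw [hdrop]
            rw [ih t ([r].reverse ++ acc) (by simp at h ⊢; omega)]
            simp [hco]
          · have hpre : ¬ (List.isPrefixOf [o] (c :: t) = true) := by
              simp [List.isPrefixOf]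
              exact fun hh => absurd hh.symm hco
            rw [if_neg hpre]
            rw [ih t (c :: acc) (by simp at h ⊢; omega)]
            simp [hco]

lemma replace_single (o r : Char) (l : List Char) :
    PySem.Chars.replace l [o] [r] = l.map (fun c => if c = o then r else c) := by
  rw [PySem.Chars.replace]
  rw [if_neg (by simp)]
  rw [replace_go_single o r l.length l [] (le_refl _)]
  simp

lemma bitcond (N k : Nat) (hk : k < N) (v : Int) :
    ((v % 2 ^ N).toNat / 2 ^ k % 2 = 1) ↔ (v % 2 ^ (k + 1) - v % 2 ^ k ≠ 0) := by
  have hposN : (0:Int) < 2 ^ N := by positivity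
  have hm0 : 0 ≤ v % 2 ^ N := Int.emod_nonneg _ (ne_of_gt hposN)
  set M := (v % 2 ^ N).toNat with hM
  have hcast : v % 2 ^ N = (M : Int) := (Int.toNat_of_nonneg hm0).symm
  have h1 : v % 2 ^ (k+1) = ((M % 2 ^ (k+1) : Nat) : Int) := by
    rw [← Int.emod_emod_of_dvd v (pow_dvd_pow 2 (by omega : k + 1 ≤ N)), hcast, cast_nat_mod]
  have h2 : v % 2 ^ k = ((M % 2 ^ k : Nat) : Int) := by
    rw [← Int.emod_emod_of_dvd v (pow_dvd_pow 2 (by omega : k ≤ N)), hcast, cast_nat_mod]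
  rw [h1, h2]
  have h3 := natMod2 M k
  have h4 : (0:Nat) < 2 ^ k := by positivity
  have h5 : M / 2 ^ k % 2 = 0 ∨ M / 2 ^ k % 2 = 1 := by omega
  rw [ne_eq, Int.sub_eq_zero, Int.natCast_inj]
  constructor
  · intro h
    rw [h] at h3
    intro hx
    omega
  · intro h
    rcases h5 with h5 | h5
    · exfalso
      rw [h5] at h3
      simp at h3
      exact h (by omega)
    · exact h5

lemma row_eq (N : Nat) (hN : 1 ≤ N) (v : Int) :
    parseToBinary (N : Int) v = rowAlt (N : Int) v := by
  unfold parseToBinary rowAlt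
  rw [foldA]
  have hposN : (0:Int) < 2 ^ N := by positivity
  have hsh : (1 <<< ((N : Int)).toNat : Int) - 1 = 2 ^ N - 1 := by
    rw [Int.toNat_natCast]
    simp [Nat.shiftLeft_eq]
  rw [hsh, band_mask v N]
  have hm0 : 0 ≤ v % 2 ^ N := Int.emod_nonneg _ (ne_of_gt hposN)
  have hmlt : v % 2 ^ N < 2 ^ N := Int.emod_lt_of_pos _ hposN
  set M := (v % 2 ^ N).toNat with hMdef
  have hMlt : M < 2 ^ N := by
    have hc : ((2 ^ N : Nat) : Int) = (2:Int) ^ N := by push_cast; ring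
    omega
  have hbin : PySem.Int.toBinChars (v % 2 ^ N) = binDigits M := by
    unfold PySem.Int.toBinChars
    rw [if_neg (by omega), ← toDigits_two_eq]
  rw [hbin, zfill_eq N M (binDigits_length_le N M hN hMlt), padded_eq N hN M hMlt,
    replace_single, replace_single]
  congr 1
  simp only [List.map_reverse, List.map_map]
  congr 1
  apply List.map_congr_left
  intro k hk
  have hkN : k < N := List.mem_range.1 hk
  have hb := bitcond N k hkN v
  rw [← hMdef] at hb
  simp only [Function.comp_apply]
  by_cases hc : v % 2 ^ (k + 1) - v % 2 ^ k ≠ 0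
  · rw [if_pos hc, if_pos (hb.2 hc)]
    decide
  · rw [if_neg hc]
    rw [if_neg (fun hx => hc (hb.1 hx))]
    decide

lemma foldTop (pn : Int) (arr1 arr2 : List Int) :
    ∀ (l : List Int) (ar : List Int) (ans : List String), (∀ i ∈ l, 0 ≤ i ∧ i < (ar.length : Int)) →
    (l.foldl
      (fun (st : List Int × List String) i =>
        let ar' := PySem.List.pySetD st.1 i
          (PySem.Int.bor (PySem.List.pyGetD arr1 i 0) (PySem.List.pyGetD arr2 i 0))
        (ar', st.2 ++ [parseToBinary pn (PySem.List.pyGetD ar' i 0)]))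
      (ar, ans)).2
    = ans ++ l.map (fun i =>
        parseToBinary pn (PySem.Int.bor (PySem.List.pyGetD arr1 i 0) (PySem.List.pyGetD arr2 i 0))) := by
  intro l
  induction l with
  | nil => intro ar ans _; simp
  | cons i t ih =>
      intro ar ans hmem
      obtain ⟨hi0, hilt⟩ := hmem i (List.mem_cons_self)
      simp only [List.foldl_cons]
      have hset : PySem.List.pySetD ar i
          (PySem.Int.bor (PySem.List.pyGetD arr1 i 0) (PySem.List.pyGetD arr2 i 0))
          = ar.set i.toNat (PySem.Int.bor (PySem.List.pyGetD arr1 i 0) (PySem.List.pyGetD arr2 i 0)) :=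
        PySem.List.pySetD_of_nonneg ar _ hi0
      have hlen : (ar.set i.toNat (PySem.Int.bor (PySem.List.pyGetD arr1 i 0) (PySem.List.pyGetD arr2 i 0))).length = ar.length := by
        simp
      have hget : PySem.List.pyGetD (ar.set i.toNat (PySem.Int.bor (PySem.List.pyGetD arr1 i 0) (PySem.List.pyGetD arr2 i 0))) i 0
          = PySem.Int.bor (PySem.List.pyGetD arr1 i 0) (PySem.List.pyGetD arr2 i 0) := by
        rw [PySem.List.pyGetD_eq_getElem _ _ hi0 (by rw [hlen]; exact_mod_cast hilt)]
        exact List.getElem_set_self _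
      simp only [hset, hget]
      rw [ih _ _ (by
        intro j hj
        obtain ⟨hj0, hjlt⟩ := hmem j (List.mem_cons_of_mem _ hj)
        exact ⟨hj0, by rw [hlen]; exact hjlt⟩)]
      simp

-- ===== VERDICT (by name: the statement is the Claim_ definition above) =====
theorem solution_spec : Claim_equal_solution := by
  intro n arr1 arr2 _ _
  unfold Spec_solution solution solution_alt
  rw [foldTop n arr1 arr2 (PySem.List.pyRange 0 n 1) (List.replicate n.toNat 0) []
    (by
      intro i hi
      have h := PySem.List.mem_pyRange_one.1 hi
      refine ⟨h.1, ?_⟩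
      rw [List.length_replicate]
      have : (0:Int) < n := lt_of_le_of_lt h.1 h.2
      rw [Int.toNat_of_nonneg (le_of_lt this)]
      exact h.2)]
  rw [List.nil_append]
  apply List.map_congr_left
  intro i hi
  have h := PySem.List.mem_pyRange_one.1 hi
  have hn1 : 1 ≤ n := by omega
  have hN : n = ((n.toNat : Nat) : Int) := by omega
  rw [hN]
  exact row_eq n.toNat (by omega) _
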